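-- pv_equiv track=rewrite | github.com/ramon284/SudokuSolvers | src/rumy_sat_solver.py | minClauses
-- ===== SOURCE A (Python) =====
-- def get_clause_size(clause): # @Wafaa
--     counter = 0
--     for literal in clause:
--         counter = counter + 1
--     return counter
--
-- def minClauses(cnf_formula): # @Wafaa
--     minClauses = []
--     size = -1
--     for clause in cnf_formula:
--         clauseSize = get_clause_size(clause)
--         # Either the current clause is smaller
--         if size == -1 or clauseSize < size:
--             minClauses = [clause]
--             size = clauseSize
--         # Or it is of minimum size as well
--         elif clauseSize == size:
--             minClauses.append(clause)
--     return minClauses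
-- ===== SOURCE B (Python) =====
-- def minClauses(cnf_formula):
--     # Two-pass: find minimum clause length, then select clauses of that length.
--     if not cnf_formula:
--         return []
--     m = min(len(clause) for clause in cnf_formula)
--     return [clause for clause in cnf_formula if len(clause) == m]
-- ===== Notes on version B (the rewrite author's own statement) =====
-- stated objective: simpler
-- what changed: Replaces A's single-pass best-so-far tracking (with a hand-written size-counting loop and -1 sentinel) by a two-pass shape: compute the minimum length with len/min, then filter clauses of that length.
import Mathlib
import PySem

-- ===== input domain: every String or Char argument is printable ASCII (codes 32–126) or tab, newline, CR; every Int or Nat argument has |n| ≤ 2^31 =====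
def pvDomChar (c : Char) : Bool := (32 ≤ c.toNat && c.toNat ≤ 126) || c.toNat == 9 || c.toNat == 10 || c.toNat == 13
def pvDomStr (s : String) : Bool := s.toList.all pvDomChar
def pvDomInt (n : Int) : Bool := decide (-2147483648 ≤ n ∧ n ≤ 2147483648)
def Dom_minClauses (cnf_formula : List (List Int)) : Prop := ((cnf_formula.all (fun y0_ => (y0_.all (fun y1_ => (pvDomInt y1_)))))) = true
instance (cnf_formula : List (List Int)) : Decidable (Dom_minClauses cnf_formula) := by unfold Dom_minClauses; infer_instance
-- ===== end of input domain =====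

-- B replaces A's single-pass best-so-far tracking (hand-counted sizes, -1 sentinel)
-- by a two-pass "compute minimum length, then filter" shape; return values proved equal.


-- ===== PORT A =====
-- hand-written size counter of A (counter = counter + 1 over the literals)
def get_clause_size (clause : List Int) : Int :=
  clause.foldl (fun counter _ => counter + 1) 0

-- A's single loop: state (minClauses, size), size starts at -1
def minClauses (cnf_formula : List (List Int)) : List (List Int) :=
  (cnf_formula.foldl
    (fun (st : List (List Int) × Int) clause =>
      let clauseSize := get_clause_size clause
      if st.2 = -1 ∨ clauseSize < st.2 then ([clause], clauseSize)
      else if clauseSize = st.2 then (st.1 ++ [clause], st.2)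
      else st)
    ([], -1)).1

-- ===== PORT B =====
-- two passes: min of the lengths (guarding the empty formula), then filter
def minClauses_alt (cnf_formula : List (List Int)) : List (List Int) :=
  match cnf_formula with
  | [] => []
  | c :: t =>
    let m := t.foldl (fun a x => min a x.length) c.length
    (c :: t).filter (fun x => x.length = m)

-- ===== PRECONDITION & SPEC =====
def Spec_minClauses (cnf_formula : List (List Int)) (out : List (List Int)) : Prop := out = minClauses_alt cnf_formula
instance (cnf_formula : List (List Int)) (out : List (List Int)) : Decidable (Spec_minClauses cnf_formula out) := by unfold Spec_minClauses; infer_instance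

-- ===== CLAIM (what is proved, stated in full; the proofs are below) =====
def Claim_equal_minClauses : Prop := ∀ (cnf_formula : List (List Int)), Dom_minClauses cnf_formula → Spec_minClauses cnf_formula (minClauses cnf_formula)

-- ===== LEMMAS AND PROOFS =====

lemma get_clause_size_eq (clause : List Int) : get_clause_size clause = (clause.length : Int) := by
  unfold get_clause_size
  suffices h : ∀ (n : Int), clause.foldl (fun counter _ => counter + 1) n = n + clause.length by
    simpa using h 0
  induction clause with
  | nil => simp
  | cons c t ih => intro n; simp [List.foldl, ih]; ring

-- abbreviation for A's loop step
def stepA (st : List (List Int) × Int) (clause : List Int) : List (List Int) × Int :=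
  let clauseSize := get_clause_size clause
  if st.2 = -1 ∨ clauseSize < st.2 then ([clause], clauseSize)
  else if clauseSize = st.2 then (st.1 ++ [clause], st.2)
  else st

-- running minimum of B
def mfold (l : List (List Int)) (s : Nat) : Nat := l.foldl (fun a x => min a x.length) s

lemma mfold_le (l : List (List Int)) (s : Nat) : mfold l s ≤ s := by
  induction l generalizing s with
  | nil => simp [mfold]
  | cons c t ih =>
    have := ih (min s c.length)
    simp only [mfold, List.foldl] at *
    omega

-- loop invariant for A's fold once the sentinel has been replaced by a real size s
lemma loop_inv (l : List (List Int)) : ∀ (acc : List (List Int)) (s : Nat),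
    l.foldl stepA (acc, (s : Int)) =
      ((if mfold l s < s then [] else acc) ++ l.filter (fun c => c.length = mfold l s),
       (mfold l s : Int)) := by
  induction l with
  | nil => intro acc s; simp [mfold]
  | cons c t ih =>
    intro acc s
    have hm : mfold (c :: t) s = mfold t (min s c.length) := by simp [mfold, List.foldl]
    have hstep : ∀ st, List.foldl stepA st (c :: t) = List.foldl stepA (stepA st c) t := by
      intro st; rfl
    rw [hstep]
    rcases lt_trichotomy c.length s with h | h | h
    · -- new strict minimum: reset
      have hA : stepA (acc, (s : Int)) c = ([c], (c.length : Int)) := by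
        have hlt : ((c.length : Int) < (s : Int)) := by exact_mod_cast h
        simp [stepA, get_clause_size_eq, hlt]
      have hmin : min s c.length = c.length := by omega
      rw [hA, ih [c] c.length, hm, hmin]
      have hle := mfold_le t c.length
      have hlt2 : mfold t c.length < s := lt_of_le_of_lt hle h
      rw [if_pos hlt2]
      by_cases hc : mfold t c.length < c.length
      · have hne : ¬ (c.length = mfold t c.length) := by omega
        simp [hne, hc]
      · have hceq : mfold t c.length = c.length := by omega
        simp [hceq]
    · -- tie: append
      subst h
      have hA : stepA (acc, (c.length : Int)) c = (acc ++ [c], (c.length : Int)) := by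
        have h1 : ¬ ((c.length : Int) < (c.length : Int)) := lt_irrefl _
        have h2 : ((c.length : Int)) ≠ -1 := by omega
        simp [stepA, get_clause_size_eq, h2]
      have hmin : min c.length c.length = c.length := by omega
      rw [hA, ih (acc ++ [c]) c.length, hm, hmin]
      have hle := mfold_le t c.length
      by_cases hc : mfold t c.length < c.length
      · have hne : ¬ (c.length = mfold t c.length) := by omega
        simp [hne, hc]
      · have hceq : mfold t c.length = c.length := by omega
        simp [hceq]
    · -- larger clause: skip
      have hA : stepA (acc, (s : Int)) c = (acc, (s : Int)) := by
        have h1 : ¬ ((c.length : Int) < (s : Int)) := by exact_mod_cast not_lt.mpr (le_of_lt h)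
        have h2 : ((s : Int)) ≠ -1 := by omega
        have h3 : ((c.length : Int)) ≠ ((s : Int)) := by exact_mod_cast Nat.ne_of_gt h
        simp [stepA, get_clause_size_eq, h1, h2, h3]
      have hmin : min s c.length = s := by omega
      rw [hA, ih acc s, hm, hmin]
      have hle := mfold_le t s
      have hne : ¬ (c.length = mfold t s) := by omega
      simp [hne]

-- ===== VERDICT (by name: the statement is the Claim_ definition above) =====
theorem minClauses_spec : Claim_equal_minClauses := by
  intro cnf _
  unfold Spec_minClauses
  match cnf with
  | [] => rfl
  | c :: t =>
    unfold minClauses minClauses_alt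
    have hfirst : stepA ([], -1) c = ([c], (c.length : Int)) := by
      simp [stepA, get_clause_size_eq]
    have hstep : List.foldl stepA ([], -1) (c :: t) = List.foldl stepA (stepA ([], -1) c) t := rfl
    show (List.foldl stepA ([], -1) (c :: t)).1 = _
    rw [hstep, hfirst, loop_inv t [c] c.length]
    have hle := mfold_le t c.length
    simp only [mfold] at hle ⊢
    by_cases hc : List.foldl (fun a x => min a x.length) c.length t < c.length
    · have hne : ¬ (c.length = List.foldl (fun a x => min a x.length) c.length t) := by omega
      rw [if_pos hc]
      simp only [List.filter_cons, hne, decide_false, List.nil_append]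
      rfl
    · have hceq : List.foldl (fun a x => min a x.length) c.length t = c.length := by omega
      rw [if_neg hc]
      simp [hceq]
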